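-- pv_equiv track=rewrite | github.com/Okwesie/Set-Savants | Arthur_Fiahagbe_Smart_Code.py | convert_negative
-- ===== SOURCE A (Python) =====
-- def convert_negative(expression):
--     expression_list = []
--     for i in expression:
--         expression_list.append(i)
--
--
--     #Finding all occurences of '-'
--     indexOfcompliment = []
--     for i in range(len(expression)):
--         if expression[i] == '-':
--             indexOfcompliment.append(i)
--
--
--     #Replacing all '-' with " ' "
--     num3 = len(indexOfcompliment)
--     for i in range(num3):
--         expression_list[indexOfcompliment[i]] = expression_list[indexOfcompliment[i] + 1]
--         expression_list[indexOfcompliment[i]+ 1] = "'"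
--
--     return ''.join(expression_list)
-- ===== SOURCE B (Python) =====
-- def convert_negative(expression):
--     out = []
--     for p in range(len(expression)):
--         c = expression[p]
--         if c == '-':
--             out.append(expression[p + 1])
--         elif p > 0 and expression[p - 1] == '-':
--             out.append("'")
--         else:
--             out.append(c)
--     return ''.join(out)
-- ===== Notes on version B (the rewrite author's own statement) =====
-- stated objective: simpler
-- what changed: Replaces A's three passes (copy to list, collect all dash indices, mutate the list in place at each index) by one left-to-right classifying sweep that appends, per position, the look-ahead char after a dash, an apostrophe after a dash, or the char itself.
import Mathlib
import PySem

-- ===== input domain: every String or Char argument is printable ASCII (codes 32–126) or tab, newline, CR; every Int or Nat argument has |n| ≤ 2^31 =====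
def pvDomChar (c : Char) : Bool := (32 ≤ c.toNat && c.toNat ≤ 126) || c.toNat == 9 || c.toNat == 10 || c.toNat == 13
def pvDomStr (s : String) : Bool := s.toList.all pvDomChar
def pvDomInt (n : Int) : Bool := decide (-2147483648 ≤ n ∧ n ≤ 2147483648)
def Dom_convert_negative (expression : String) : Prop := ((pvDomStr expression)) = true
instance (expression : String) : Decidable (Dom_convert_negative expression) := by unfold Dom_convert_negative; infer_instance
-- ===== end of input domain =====

-- B replaces A's three passes (copy, collect dash indices, mutate in place) by one
-- left-to-right classifying sweep; objective: simpler (not claimed faster).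

-- ===== PORT A =====
-- the body of A's third loop: expression_list[idx] = expression_list[idx+1]; expression_list[idx+1] = "'"
def pvMutStep (el : List Char) (idx : Int) : List Char :=
  PySem.List.pySetD (PySem.List.pySetD el idx (PySem.List.pyGetD el (idx + 1) ' ')) (idx + 1) '\''

def convert_negative (expression : String) : String :=
  let expression_list := expression.toList.foldl (fun acc c => acc ++ [c]) []
  let indexOfcompliment :=
    (PySem.List.pyRange 0 (PySem.Str.len expression) 1).foldl
      (fun acc i => if PySem.Str.pyGet? expression i = some '-' then acc ++ [i] else acc) []
  let num3 : Int := indexOfcompliment.length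
  let final :=
    (PySem.List.pyRange 0 num3 1).foldl
      (fun el i => pvMutStep el (PySem.List.pyGetD indexOfcompliment i 0)) expression_list
  String.ofList final

-- ===== PORT B =====
def convert_negative_alt (expression : String) : String :=
  let l := expression.toList
  let out :=
    (PySem.List.pyRange 0 (l.length : Int) 1).foldl
      (fun acc p =>
        let c := PySem.List.pyGetD l p ' '
        if c = '-' then acc ++ [PySem.List.pyGetD l (p + 1) ' ']
        else if 0 < p ∧ PySem.List.pyGetD l (p - 1) ' ' = '-' then acc ++ ['\'']
        else acc ++ [c])
      ([] : List Char)
  String.ofList out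

-- ===== PRECONDITION & SPEC =====
-- Pre_ excludes exactly the strings whose last character is '-': there Python A raises
-- IndexError on expression_list[idx + 1] (and Python B raises IndexError on expression[p + 1] too).
def Pre_convert_negative (expression : String) : Prop :=
  expression.toList.getD (expression.toList.length - 1) ' ' ≠ '-'
instance (expression : String) : Decidable (Pre_convert_negative expression) := by
  unfold Pre_convert_negative; infer_instance

def pvWitness_convert_negative : String := "3-4"

def Spec_convert_negative (expression : String) (out : String) : Prop := out = convert_negative_alt expression
instance (expression : String) (out : String) : Decidable (Spec_convert_negative expression out) := by unfold Spec_convert_negative; infer_instance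

-- ===== CLAIM (what is proved, stated in full; the proofs are below) =====
def Claim_equal_convert_negative : Prop := ∀ (expression : String), Dom_convert_negative expression → Pre_convert_negative expression → Spec_convert_negative expression (convert_negative expression)

-- ===== LEMMAS AND PROOFS =====

-- the per-position classification both programs compute (Nat- and Int-indexed forms)
def pvSpecF (l : List Char) (p : Nat) : Char :=
  if l.getD p ' ' = '-' then l.getD (p + 1) ' '
  else if 0 < p ∧ l.getD (p - 1) ' ' = '-' then '\'' else l.getD p ' '

def pvGI (l : List Char) (p : Int) : Char :=
  if PySem.List.pyGetD l p ' ' = '-' then PySem.List.pyGetD l (p + 1) ' '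
  else if 0 < p ∧ PySem.List.pyGetD l (p - 1) ' ' = '-' then '\'' else PySem.List.pyGetD l p ' '

lemma pvMut_length (S : List Int) (l : List Char) :
    (S.foldl pvMutStep l).length = l.length := by
  induction S generalizing l with
  | nil => rfl
  | cons i S ih =>
    simp only [List.foldl_cons, ih, pvMutStep]
    simp [PySem.List.length_pySetD]

lemma pvGetD_set (xs : List Char) (v : Char) (i : Nat) (j : Nat) (d : Char) :
    ((xs.set i v)).getD j d = if j = i ∧ i < xs.length then v else xs.getD j d := by
  by_cases h : j = i ∧ i < xs.length
  · obtain ⟨rfl, h2⟩ := h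
    simp [List.getD, h2]
  · rcases eq_or_ne j i with rfl | hne
    · have h2 : xs.length ≤ j := by by_contra hc; exact h ⟨rfl, by omega⟩
      rw [List.set_eq_of_length_le h2]; simp; omega
    · simp [List.getD, Ne.symm hne, hne]

-- what A's in-place mutation loop leaves at each position, for any strictly
-- increasing, in-bounds list of indices
lemma pvMut_getD (l : List Char) (S : List Int)
    (hS : S.Pairwise (· < ·))
    (hb : ∀ i ∈ S, 0 ≤ i ∧ i + 1 < (l.length : Int)) (p : Nat) :
    (S.foldl pvMutStep l).getD p ' ' =
      if ((p : Int) ∈ S) then l.getD (p + 1) ' '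
      else if ((p : Int) - 1 ∈ S) then '\'' else l.getD p ' ' := by
  induction S using List.reverseRecOn generalizing p with
  | nil => simp
  | append_singleton S i ih =>
    have hpa := List.pairwise_append.mp hS
    have hS' : S.Pairwise (· < ·) := hpa.1
    have hlt : ∀ a ∈ S, a < i := fun a ha => hpa.2.2 a ha i (by simp)
    have hb' : ∀ a ∈ S, 0 ≤ a ∧ a + 1 < (l.length : Int) := fun a ha => hb a (by simp [ha])
    obtain ⟨hi0, hi1⟩ := hb i (by simp)
    have hik : i = ((i.toNat : Nat) : Int) := (Int.toNat_of_nonneg hi0).symm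
    set k := i.toNat with hkdef
    have hkn : k + 1 < l.length := by omega
    rw [List.foldl_append, List.foldl_cons, List.foldl_nil]
    set X := S.foldl pvMutStep l with hX
    have hlen : X.length = l.length := pvMut_length S l
    have hv : PySem.List.pyGetD X (i + 1) ' ' = l.getD (k + 1) ' ' := by
      rw [hik, show ((k : Int) + 1) = ((k + 1 : Nat) : Int) by push_cast; ring,
        PySem.List.pyGetD_natCast, ih hS' hb' (k + 1)]
      have h1 : ((k + 1 : Nat) : Int) ∉ S := fun h => by have := hlt _ h; omega
      have h2 : (((k + 1 : Nat) : Int) - 1) ∉ S := fun h => by have := hlt _ h; omega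
      rw [if_neg h1, if_neg h2]
    have hmut : pvMutStep X i = (X.set k (l.getD (k + 1) ' ')).set (k + 1) '\'' := by
      rw [pvMutStep, hv, hik, PySem.List.pySetD_natCast,
        PySem.List.pySetD_of_nonneg _ _ (by omega : (0:Int) ≤ (k : Int) + 1)]
      norm_num
    rw [hmut, pvGetD_set, pvGetD_set, hlen]
    have hlen2 : (X.set k (l.getD (k + 1) ' ')).length = l.length := by simp [hlen]
    rw [hlen2]
    by_cases hp1 : p = k + 1
    · subst hp1
      rw [if_pos ⟨rfl, hkn⟩]
      have m1 : ((k + 1 : Nat) : Int) ∉ S ++ [i] := by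
        simp only [List.mem_append, List.mem_singleton]
        rintro (h | h)
        · have := hlt _ h; omega
        · omega
      have m2 : (((k + 1 : Nat) : Int) - 1) ∈ S ++ [i] :=
        List.mem_append.mpr (Or.inr (by simp; omega))
      rw [if_neg m1, if_pos m2]
    · rw [if_neg (fun h => hp1 h.1)]
      by_cases hp2 : p = k
      · subst hp2
        rw [if_pos ⟨rfl, by omega⟩]
        have m1 : ((k : Nat) : Int) ∈ S ++ [i] :=
          List.mem_append.mpr (Or.inr (by simp; omega))
        rw [if_pos m1]
      · rw [if_neg (fun h => hp2 h.1), ih hS' hb' p]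
        have e1 : ((p : Int) ∈ S ++ [i]) ↔ ((p : Int) ∈ S) := by
          simp only [List.mem_append, List.mem_singleton]
          constructor
          · rintro (h | h)
            · exact h
            · exact absurd (by omega : p = k) hp2
          · exact Or.inl
        have e2 : (((p : Int) - 1) ∈ S ++ [i]) ↔ (((p : Int) - 1) ∈ S) := by
          simp only [List.mem_append, List.mem_singleton]
          constructor
          · rintro (h | h)
            · exact h
            · exact absurd (by omega : p = k + 1) hp1
          · exact Or.inl
        simp only [e1, e2]

lemma pvGI_cast (l : List Char) (k : Nat) : pvGI l ((k : Nat) : Int) = pvSpecF l k := by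
  cases k with
  | zero =>
    have h1 : PySem.List.pyGetD l 1 ' ' = l.getD 1 ' ' := by
      rw [show (1 : Int) = ((1 : Nat) : Int) by norm_num, PySem.List.pyGetD_natCast]
    simp [pvGI, pvSpecF, PySem.List.pyGetD_zero, h1]
  | succ j =>
    have h1 : ((j + 1 : Nat) : Int) + 1 = ((j + 2 : Nat) : Int) := by push_cast; ring
    have h2 : ((j + 1 : Nat) : Int) - 1 = ((j : Nat) : Int) := by push_cast; ring
    simp only [pvGI, pvSpecF, h1, h2, PySem.List.pyGetD_natCast]
    simp

-- B's sweep produces exactly the per-position classification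
lemma pvB_list (l : List Char) :
    (PySem.List.pyRange 0 (l.length : Int) 1).foldl
      (fun acc p =>
        let c := PySem.List.pyGetD l p ' '
        if c = '-' then acc ++ [PySem.List.pyGetD l (p + 1) ' ']
        else if 0 < p ∧ PySem.List.pyGetD l (p - 1) ' ' = '-' then acc ++ ['\'']
        else acc ++ [c])
      ([] : List Char) = (List.range l.length).map (pvSpecF l) := by
  have hstep : (fun (acc : List Char) (p : Int) =>
        let c := PySem.List.pyGetD l p ' '
        if c = '-' then acc ++ [PySem.List.pyGetD l (p + 1) ' ']
        else if 0 < p ∧ PySem.List.pyGetD l (p - 1) ' ' = '-' then acc ++ ['\'']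
        else acc ++ [c]) = fun acc p => acc ++ [pvGI l p] := by
    funext acc p
    simp only [pvGI]
    split_ifs <;> rfl
  rw [hstep, PySem.List.foldl_append_singleton_eq_map, List.nil_append,
    PySem.List.pyRange_one, List.map_map]
  have hn : ((l.length : Int) - 0).toNat = l.length := by omega
  rw [hn]
  refine List.map_congr_left (fun k hk => ?_)
  simp only [Function.comp_apply, zero_add]
  exact pvGI_cast l k

-- ===== VERDICT (by name: the statement is the Claim_ definition above) =====
theorem convert_negative_spec : Claim_equal_convert_negative := by
  intro e _hdom hpre
  unfold Spec_convert_negative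
  set l := e.toList with hl
  have hpre' : l.getD (l.length - 1) ' ' ≠ '-' := hpre
  set S := (PySem.List.pyRange 0 (PySem.Str.len e) 1).foldl
      (fun acc i => if PySem.Str.pyGet? e i = some '-' then acc ++ [i] else acc)
      ([] : List Int) with hSdef
  have hA : convert_negative e = String.ofList (S.foldl pvMutStep l) := by
    show String.ofList ((PySem.List.pyRange 0 ((S.length : Nat) : Int) 1).foldl
        (fun el i => pvMutStep el (PySem.List.pyGetD S i 0))
        (e.toList.foldl (fun acc c => acc ++ [c]) [])) = _
    rw [PySem.List.foldl_pyRange_zero_pyGetD' S 0 pvMutStep,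
        PySem.List.foldl_append_singleton_eq_self, List.nil_append]
  have hSfilter : S = (PySem.List.pyRange 0 (PySem.Str.len e) 1).filter
      (fun i => decide (PySem.Str.pyGet? e i = some '-')) := by
    rw [hSdef]
    have hfun : (fun (acc : List Int) (i : Int) =>
          if PySem.Str.pyGet? e i = some '-' then acc ++ [i] else acc)
        = fun acc i => if (fun i => decide (PySem.Str.pyGet? e i = some '-')) i = true
            then acc ++ [i] else acc := by
      funext acc i
      by_cases h : PySem.Str.pyGet? e i = some '-'
      · rw [if_pos h, if_pos (decide_eq_true h)]
      · rw [if_neg h, if_neg (fun hc => h (of_decide_eq_true hc))]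
    rw [hfun, PySem.List.foldl_append_if_eq_filter, List.nil_append]
  have hlen_e : PySem.Str.len e = (l.length : Int) := PySem.Str.len_eq e
  have hpair : S.Pairwise (· < ·) := by
    rw [hSfilter]
    exact List.Pairwise.filter _ (PySem.List.pairwise_lt_pyRange_one _ _)
  have hcharS : ∀ p : Nat, ((p : Int) ∈ S) ↔ (p < l.length ∧ l.getD p ' ' = '-') := by
    intro p
    rw [hSfilter, List.mem_filter, PySem.List.mem_pyRange_one, hlen_e]
    constructor
    · rintro ⟨⟨_, h1⟩, h2⟩
      have hp : p < l.length := by exact_mod_cast h1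
      rw [PySem.Str.pyGet?_natCast] at h2
      rw [decide_eq_true_eq] at h2
      refine ⟨hp, ?_⟩
      rw [List.getD, h2]
      rfl
    · rintro ⟨hp, hc⟩
      refine ⟨⟨Int.natCast_nonneg p, by exact_mod_cast hp⟩, ?_⟩
      rw [PySem.Str.pyGet?_natCast, decide_eq_true_eq, List.getElem?_eq_getElem hp]
      rw [← List.getD_eq_getElem l ' ' hp, hc]
  have hb : ∀ i ∈ S, 0 ≤ i ∧ i + 1 < (l.length : Int) := by
    intro i hi
    have hmem := hi
    rw [hSfilter, List.mem_filter, PySem.List.mem_pyRange_one] at hmem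
    obtain ⟨⟨h0, h1⟩, _⟩ := hmem
    refine ⟨h0, ?_⟩
    have hip : i = ((i.toNat : Nat) : Int) := (Int.toNat_of_nonneg h0).symm
    have hdash : l.getD i.toNat ' ' = '-' := ((hcharS i.toNat).mp (by rw [← hip]; exact hi)).2
    have hplen : i.toNat < l.length := by rw [hlen_e] at h1; omega
    have hne : i.toNat ≠ l.length - 1 := fun h => hpre' (h ▸ hdash)
    rw [hlen_e] at h1
    omega
  have hB : convert_negative_alt e = String.ofList ((List.range l.length).map (pvSpecF l)) :=
    congrArg String.ofList (pvB_list l)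
  rw [hA, hB]
  congr 1
  apply List.ext_getElem
  · rw [pvMut_length]; simp
  · intro n h1 h2
    have hn : n < l.length := by rwa [pvMut_length] at h1
    rw [← List.getD_eq_getElem _ ' ' h1, ← List.getD_eq_getElem _ ' ' h2]
    rw [pvMut_getD l S hpair hb n]
    have hr : ((List.range l.length).map (pvSpecF l)).getD n ' ' = pvSpecF l n := by
      rw [List.getD, List.getElem?_map, List.getElem?_range hn]
      rfl
    rw [hr, pvSpecF]
    by_cases hc : l.getD n ' ' = '-'
    · rw [if_pos ((hcharS n).mpr ⟨hn, hc⟩), if_pos hc]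
    · rw [if_neg (fun h => hc ((hcharS n).mp h).2), if_neg hc]
      cases n with
      | zero =>
        have hm : ((0 : Nat) : Int) - 1 ∉ S := fun h => by have := (hb _ h).1; omega
        rw [if_neg hm, if_neg (by simp : ¬ (0 < 0 ∧ l.getD (0 - 1) ' ' = '-'))]
      | succ j =>
        have he : ((j + 1 : Nat) : Int) - 1 = ((j : Nat) : Int) := by push_cast; ring
        rw [he]
        by_cases hd : l.getD j ' ' = '-'
        · rw [if_pos ((hcharS j).mpr ⟨by omega, hd⟩), if_pos ⟨Nat.succ_pos j, hd⟩]
        · rw [if_neg (fun h => hd ((hcharS j).mp h).2), if_neg (fun h => hd h.2)]
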